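-- pv_equiv track=rewrite | github.com/lin-z-z/svg2pptx | src/svg2pptx/result_status.py | _map_filter_codes
-- ===== SOURCE A (Python) =====
-- def _append_unique(target: list[str], value: str) -> None:
--     if value not in target:
--         target.append(value)
--
-- def _map_filter_codes(filter_results: list[dict]) -> list[str]:
--     codes: list[str] = []
--     for item in filter_results:
--         support_level = item.get("support_level", "")
--         if support_level == "approximate":
--             _append_unique(codes, "FILTER_APPROXIMATION")
--         elif support_level == "controlled_degradation":
--             _append_unique(codes, "FILTER_CONTROLLED_DEGRADATION")
--         elif support_level == "unsupported":
--             _append_unique(codes, "FILTER_UNSUPPORTED")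
--     return codes
-- ===== SOURCE B (Python) =====
-- _LEVEL_CODES = (
--     ("approximate", "FILTER_APPROXIMATION"),
--     ("controlled_degradation", "FILTER_CONTROLLED_DEGRADATION"),
--     ("unsupported", "FILTER_UNSUPPORTED"),
-- )
--
-- def _map_filter_codes(filter_results):
--     # Sort-by-first-occurrence algorithm: for each of the three known levels,
--     # find the position of its first occurrence, then order the codes by it.
--     levels = [item.get("support_level", "") for item in filter_results]
--     pairs = []
--     for level, code in _LEVEL_CODES:
--         if level in levels:
--             pairs.append((levels.index(level), code))
--     pairs.sort(key=lambda p: p[0])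
--     return [code for _, code in pairs]
-- ===== Notes on version B (the rewrite author's own statement) =====
-- stated objective: alternative
-- what changed: B uses a sort-by-first-occurrence algorithm: it extracts the support levels, scans for each of the three known levels its first-occurrence index, and sorts the (index, code) pairs by index, instead of A's single pass that dispatches through an if/elif chain and deduplicates inline with a membership test.
import Mathlib
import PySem

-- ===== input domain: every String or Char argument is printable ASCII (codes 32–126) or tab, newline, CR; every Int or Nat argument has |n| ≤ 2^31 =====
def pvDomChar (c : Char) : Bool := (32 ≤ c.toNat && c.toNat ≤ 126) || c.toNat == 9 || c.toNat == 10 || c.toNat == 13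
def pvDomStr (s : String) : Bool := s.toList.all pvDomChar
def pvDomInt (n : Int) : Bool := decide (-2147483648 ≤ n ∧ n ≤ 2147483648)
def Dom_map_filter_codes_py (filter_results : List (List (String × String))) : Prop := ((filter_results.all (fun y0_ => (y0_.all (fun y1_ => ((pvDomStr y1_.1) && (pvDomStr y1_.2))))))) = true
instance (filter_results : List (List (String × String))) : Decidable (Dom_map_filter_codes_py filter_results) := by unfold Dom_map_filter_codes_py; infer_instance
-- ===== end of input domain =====

-- B replaces A's single pass with inline dedup by a different algorithm: per-level first-occurrence
-- index scans followed by a sort of the (index, code) pairs by index; alternative decomposition, same output.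


-- item.get("support_level", "") : first-match lookup in the association list, defaulting to ""
def pvGetSupportLevel (item : List (String × String)) : String :=
  ((item.find? (fun p => p.1 == "support_level")).map Prod.snd).getD ""

-- ===== PORT A =====
def appendUnique (target : List String) (value : String) : List String :=
  if value ∈ target then target else target ++ [value]

def map_filter_codes_py (filter_results : List (List (String × String))) : List String :=
  filter_results.foldl
    (fun codes item =>
      let support_level := pvGetSupportLevel item
      if support_level = "approximate" then appendUnique codes "FILTER_APPROXIMATION"
      else if support_level = "controlled_degradation" then appendUnique codes "FILTER_CONTROLLED_DEGRADATION"
      else if support_level = "unsupported" then appendUnique codes "FILTER_UNSUPPORTED"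
      else codes)
    []

-- ===== PORT B =====
-- the static _LEVEL_CODES table of Source B
def pvLevelCodes : List (String × String) :=
  [("approximate", "FILTER_APPROXIMATION"),
   ("controlled_degradation", "FILTER_CONTROLLED_DEGRADATION"),
   ("unsupported", "FILTER_UNSUPPORTED")]

-- Source B's loop 'for level, code in _LEVEL_CODES: if level in levels: pairs.append((levels.index(level), code))'
-- (levels.index after the membership guard always succeeds, hence .getD 0)
def pvPairsOf (levels : List String) : List (Nat × String) :=
  pvLevelCodes.foldl
    (fun pairs lc =>
      if lc.1 ∈ levels then pairs ++ [((PySem.List.index? levels lc.1).getD 0, lc.2)] else pairs)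
    []

def map_filter_codes_py_alt (filter_results : List (List (String × String))) : List String :=
  let levels := filter_results.map pvGetSupportLevel
  let pairs := pvPairsOf levels
  (PySem.List.sorted pairs (fun p => p.1) false).map Prod.snd

-- ===== PRECONDITION & SPEC =====
def Spec_map_filter_codes_py (filter_results : List (List (String × String))) (out : List String) : Prop := out = map_filter_codes_py_alt filter_results
instance (filter_results : List (List (String × String))) (out : List String) : Decidable (Spec_map_filter_codes_py filter_results out) := by unfold Spec_map_filter_codes_py; infer_instance

-- ===== CLAIM (what is proved, stated in full; the proofs are below) =====
def Claim_equal_map_filter_codes_py : Prop := ∀ (filter_results : List (List (String × String))), Dom_map_filter_codes_py filter_results → Spec_map_filter_codes_py filter_results (map_filter_codes_py filter_results)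

-- ===== LEMMAS AND PROOFS =====

-- characterization of membership in B's pair-building fold
theorem mem_pairsOf_foldl (cands : List (String × String)) (L : List String)
    (acc : List (Nat × String)) (a : Nat × String) :
    a ∈ cands.foldl
        (fun pairs lc =>
          if lc.1 ∈ L then pairs ++ [((PySem.List.index? L lc.1).getD 0, lc.2)] else pairs)
        acc
    ↔ a ∈ acc ∨ ∃ lc ∈ cands, lc.1 ∈ L ∧ a = ((PySem.List.index? L lc.1).getD 0, lc.2) := by
  induction cands generalizing acc with
  | nil => simp
  | cons x t ih =>
    rw [List.foldl_cons, ih]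
    by_cases hx : x.1 ∈ L <;> simp [hx]
    all_goals tauto

theorem mem_pairsOf (L : List String) (a : Nat × String) :
    a ∈ pvPairsOf L
    ↔ ∃ lc ∈ pvLevelCodes, lc.1 ∈ L ∧ a = ((PySem.List.index? L lc.1).getD 0, lc.2) := by
  simpa using mem_pairsOf_foldl pvLevelCodes L [] a

-- first-occurrence index of a present element is < length
theorem idx_getD_lt {L : List String} {s : String} (h : s ∈ L) :
    (PySem.List.index? L s).getD 0 < L.length := by
  obtain ⟨k, hk⟩ := Option.isSome_iff_exists.mp ((PySem.List.index?_isSome_iff L s).mpr h)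
  obtain ⟨hlt, -, -⟩ := PySem.List.getElem_of_index?_eq_some hk
  rw [hk]
  exact hlt

theorem pairsOf_fst_lt {L : List String} {a : Nat × String} (h : a ∈ pvPairsOf L) :
    a.1 < L.length := by
  obtain ⟨lc, -, hmem, rfl⟩ := (mem_pairsOf L a).mp h
  exact idx_getD_lt hmem

-- a code is collected by B iff its level occurs in levels
theorem level_of_code {L : List String} {lv code : String} (hcand : (lv, code) ∈ pvLevelCodes) :
    (code ∈ (pvPairsOf L).map Prod.snd) ↔ lv ∈ L := by
  rw [List.mem_map]
  constructor
  · rintro ⟨a, ha, rfl⟩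
    obtain ⟨lc, hlc, hmem, rfl⟩ := (mem_pairsOf L a).mp ha
    simp only [pvLevelCodes, List.mem_cons, List.not_mem_nil, or_false] at hcand hlc
    rcases hlc with rfl | rfl | rfl <;> rcases hcand with h | h | h <;>
      simp_all [Prod.mk.injEq]
  · intro hmem
    exact ⟨((PySem.List.index? L lv).getD 0, code), (mem_pairsOf L _).mpr ⟨(lv, code), hcand, hmem, rfl⟩, rfl⟩

-- one step of the pair-building fold is unchanged by appending lv when the candidate is present or ≠ lv
theorem step_keep (L : List String) (lv s c : String) (h : s ∈ L ∨ s ≠ lv)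
    (ps : List (Nat × String)) :
    (if s ∈ L ++ [lv] then ps ++ [((PySem.List.index? (L ++ [lv]) s).getD 0, c)] else ps)
    = (if s ∈ L then ps ++ [((PySem.List.index? L s).getD 0, c)] else ps) := by
  by_cases hm : s ∈ L
  · rw [if_pos (by simp [hm]), if_pos hm, PySem.List.index?_append_of_mem _ hm]
  · have hne : s ≠ lv := h.resolve_left hm
    rw [if_neg (by simp [hm, hne]), if_neg hm]

theorem pairsOf_append_unchanged (L : List String) (lv : String)
    (h : lv ∈ L ∨ (lv ≠ "approximate" ∧ lv ≠ "controlled_degradation" ∧ lv ≠ "unsupported")) :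
    pvPairsOf (L ++ [lv]) = pvPairsOf L := by
  have mk : ∀ s : String, lv ≠ s → (s ∈ L ∨ s ≠ lv) := fun s hs => Or.inr (Ne.symm hs)
  have mkmem : ∀ s : String, lv ∈ L → (s ∈ L ∨ s ≠ lv) := fun s hm => by
    by_cases e : s = lv
    · exact Or.inl (e ▸ hm)
    · exact Or.inr e
  simp only [pvPairsOf, pvLevelCodes, List.foldl]
  rcases h with h | ⟨h1, h2, h3⟩
  · rw [step_keep L lv _ _ (mkmem _ h), step_keep L lv _ _ (mkmem _ h),
        step_keep L lv _ _ (mkmem _ h)]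
  · rw [step_keep L lv _ _ (mk _ h1), step_keep L lv _ _ (mk _ h2),
        step_keep L lv _ _ (mk _ h3)]

-- one step of the fold pushed through a cons on its accumulator
theorem step_cons (L : List String) (s c : String) (x : Nat × String) (ps : List (Nat × String)) :
    (if s ∈ L then (x :: ps) ++ [((PySem.List.index? L s).getD 0, c)] else x :: ps)
    = x :: (if s ∈ L then ps ++ [((PySem.List.index? L s).getD 0, c)] else ps) := by
  split_ifs <;> simp

-- appending a NEW known level adds exactly the pair (L.length, code), up to permutation
theorem pairsOf_append_new (L : List String) (lv code : String)
    (hcand : (lv, code) ∈ pvLevelCodes) (hlv : lv ∉ L) :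
    (pvPairsOf (L ++ [lv])).Perm (pvPairsOf L ++ [(L.length, code)]) := by
  have hself : PySem.List.index? (L ++ [lv]) lv = some L.length :=
    PySem.List.index?_append_singleton_self _ _ hlv
  have hmemself : lv ∈ L ++ [lv] := by simp
  simp only [pvLevelCodes, List.mem_cons, List.not_mem_nil, or_false, Prod.mk.injEq] at hcand
  rcases hcand with ⟨rfl, rfl⟩ | ⟨rfl, rfl⟩ | ⟨rfl, rfl⟩
  · -- lv = "approximate": inserted in the FIRST slot
    simp only [pvPairsOf, pvLevelCodes, List.foldl]
    rw [step_keep L "approximate" "controlled_degradation" "FILTER_CONTROLLED_DEGRADATION" (Or.inr (by decide)),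
        step_keep L "approximate" "unsupported" "FILTER_UNSUPPORTED" (Or.inr (by decide)),
        if_pos hmemself, hself, if_neg hlv]
    simp only [Option.getD_some, List.nil_append]
    rw [step_cons, step_cons]
    exact (List.perm_append_singleton _ _).symm
  · -- lv = "controlled_degradation": inserted in the MIDDLE slot
    simp only [pvPairsOf, pvLevelCodes, List.foldl]
    rw [step_keep L "controlled_degradation" "approximate" "FILTER_APPROXIMATION" (Or.inr (by decide)),
        step_keep L "controlled_degradation" "unsupported" "FILTER_UNSUPPORTED" (Or.inr (by decide)),
        if_pos hmemself, hself, if_neg hlv]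
    simp only [Option.getD_some]
    by_cases h3 : ("unsupported" : String) ∈ L
    · rw [if_pos h3, if_pos h3]
      simp only [List.append_assoc]
      exact List.Perm.append_left _ (List.Perm.swap _ _ _)
    · rw [if_neg h3, if_neg h3]
  · -- lv = "unsupported": inserted in the LAST slot
    simp only [pvPairsOf, pvLevelCodes, List.foldl]
    rw [step_keep L "unsupported" "approximate" "FILTER_APPROXIMATION" (Or.inr (by decide)),
        step_keep L "unsupported" "controlled_degradation" "FILTER_CONTROLLED_DEGRADATION" (Or.inr (by decide)),
        if_pos hmemself, hself, if_neg hlv]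
    simp only [Option.getD_some]
    exact List.Perm.refl _

-- one loop step of A, matched against B's pairs, preserving the invariant
theorem step_case (L : List String) (zp : List (Nat × String)) (lv code : String)
    (hcand : (lv, code) ∈ pvLevelCodes)
    (hperm : zp.Perm (pvPairsOf L)) (hpw : zp.Pairwise (fun a b => a.1 < b.1)) :
    ∃ zp' : List (Nat × String),
      zp'.Perm (pvPairsOf (L ++ [lv])) ∧ zp'.Pairwise (fun a b => a.1 < b.1) ∧
      appendUnique (zp.map Prod.snd) code = zp'.map Prod.snd := by
  by_cases hlv : lv ∈ L
  · refine ⟨zp, ?_, hpw, ?_⟩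
    · rw [pairsOf_append_unchanged L lv (Or.inl hlv)]; exact hperm
    · have hc : code ∈ zp.map Prod.snd :=
        ((hperm.map Prod.snd).mem_iff).mpr ((level_of_code hcand).mpr hlv)
      simp [appendUnique, hc]
  · refine ⟨zp ++ [(L.length, code)], ?_, ?_, ?_⟩
    · exact (hperm.append_right [(L.length, code)]).trans (pairsOf_append_new L lv code hcand hlv).symm
    · refine List.pairwise_append.mpr ⟨hpw, by simp, ?_⟩
      intro a ha b hb
      have hb' : b = (L.length, code) := by simpa using hb
      have : a ∈ pvPairsOf L := hperm.subset ha
      have := pairsOf_fst_lt this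
      simp [hb'] at this ⊢
      omega
    · have hc : code ∉ zp.map Prod.snd := fun hmem =>
        hlv ((level_of_code hcand).mp (((hperm.map Prod.snd).mem_iff).mp hmem))
      simp [appendUnique, hc]

-- the invariant: A's accumulated codes are B's pairs arranged in strictly increasing index order
theorem invA (frs : List (List (String × String))) :
    ∃ zp : List (Nat × String),
      zp.Perm (pvPairsOf (frs.map pvGetSupportLevel)) ∧
      zp.Pairwise (fun a b => a.1 < b.1) ∧
      map_filter_codes_py frs = zp.map Prod.snd := by
  induction frs using List.reverseRecOn with
  | nil => exact ⟨[], by simp [pvPairsOf, pvLevelCodes], by simp, by simp [map_filter_codes_py]⟩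
  | append_singleton l x ih =>
    obtain ⟨zp, hperm, hpw, hA⟩ := ih
    have hAfold : map_filter_codes_py (l ++ [x]) =
        (let support_level := pvGetSupportLevel x
         if support_level = "approximate" then appendUnique (map_filter_codes_py l) "FILTER_APPROXIMATION"
         else if support_level = "controlled_degradation" then appendUnique (map_filter_codes_py l) "FILTER_CONTROLLED_DEGRADATION"
         else if support_level = "unsupported" then appendUnique (map_filter_codes_py l) "FILTER_UNSUPPORTED"
         else map_filter_codes_py l) := by
      simp [map_filter_codes_py, List.foldl_append]
    have hmap : (l ++ [x]).map pvGetSupportLevel = l.map pvGetSupportLevel ++ [pvGetSupportLevel x] := by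
      simp
    by_cases c1 : pvGetSupportLevel x = "approximate"
    · obtain ⟨zp', h1, h2, h3⟩ := step_case _ zp "approximate" "FILTER_APPROXIMATION" (by simp [pvLevelCodes]) hperm hpw
      exact ⟨zp', by rw [hmap, c1]; exact h1, h2, by rw [hAfold]; simp [c1, hA, h3]⟩
    · by_cases c2 : pvGetSupportLevel x = "controlled_degradation"
      · obtain ⟨zp', h1, h2, h3⟩ := step_case _ zp "controlled_degradation" "FILTER_CONTROLLED_DEGRADATION" (by simp [pvLevelCodes]) hperm hpw
        exact ⟨zp', by rw [hmap, c2]; exact h1, h2, by rw [hAfold]; simp [c2, hA, h3]⟩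
      · by_cases c3 : pvGetSupportLevel x = "unsupported"
        · obtain ⟨zp', h1, h2, h3⟩ := step_case _ zp "unsupported" "FILTER_UNSUPPORTED" (by simp [pvLevelCodes]) hperm hpw
          exact ⟨zp', by rw [hmap, c3]; exact h1, h2, by rw [hAfold]; simp [c3, hA, h3]⟩
        · refine ⟨zp, ?_, hpw, ?_⟩
          · rw [hmap, pairsOf_append_unchanged _ _ (Or.inr ⟨c1, c2, c3⟩)]
            exact hperm
          · rw [hAfold]; simp [c1, c2, c3, hA]

-- ===== VERDICT (by name: the statement is the Claim_ definition above) =====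
theorem map_filter_codes_py_spec : Claim_equal_map_filter_codes_py := by
  intro frs _
  obtain ⟨zp, hperm, hpw, hA⟩ := invA frs
  unfold Spec_map_filter_codes_py map_filter_codes_py_alt
  exact hA.trans
    (congrArg (List.map Prod.snd)
      (PySem.List.sorted_eq_of_perm_of_pairwise_lt _ zp _ hperm hpw).symm)
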